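-- pv_equiv track=rewrite | github.com/Adamssss/projectEuler | pb650.py | Dv1
-- ===== SOURCE A (Python) =====
-- def fact(n):
--     if n == 1 or n == 0:
--         return 1
--     return n*fact(n-1)
--
-- def Cv1(n,k):
--     return fact(n)//fact(k)//fact(n-k)
--
-- def Bv1(n):
--     r = 1
--     for i in range(n+1):
--         r *= Cv1(n,i)
--     return r
--
-- def Dv1(n):
--     B = Bv1(n)
--     fc = []
--     for i in range(2,n+1):
--         if B%i ==0:
--             c = 0
--             while B%i == 0:
--                 B = B//i
--                 c += 1
--             fc.append([i,c])
--     r = 1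
--     for f in fc:
--         r *= (f[0]**(f[1]+1)-1)//(f[0]-1)
--     return r
-- ===== SOURCE B (Python) =====
-- def _is_prime(p):
--     for d in range(2, p):
--         if p % d == 0:
--             return False
--     return True
--
-- def _vp(m, p):
--     c = 0
--     while m % p == 0:
--         m //= p
--         c += 1
--     return c
--
-- def Dv1(n):
--     # B = prod_{i=0..n} C(n,i) = n!^(n+1) / (prod_{j<=n} j!)^2, so the exponent of a
--     # prime p in B is sum_{j=2..n} v_p(j) * (2*j - n - 1): compute each prime's
--     # exponent directly from small numbers instead of building and factoring B.
--     r = 1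
--     for p in range(2, n + 1):
--         if _is_prime(p):
--             e = 0
--             for j in range(2, n + 1):
--                 e += _vp(j, p) * (2 * j - n - 1)
--             if e > 0:
--                 r *= (p ** (e + 1) - 1) // (p - 1)
--     return r
-- ===== Notes on version B (the rewrite author's own statement) =====
-- stated objective: alternative
-- what changed: Instead of building the huge product B of all binomials C(n,i) and trial-dividing that big integer by every i, B computes each prime's exponent in the product directly as sum_{j=2..n} v_p(j)*(2j-n-1) (from B = n!^(n+1)/(prod j!)^2), working only with small integers until the final sigma product.
import Mathlib
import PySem

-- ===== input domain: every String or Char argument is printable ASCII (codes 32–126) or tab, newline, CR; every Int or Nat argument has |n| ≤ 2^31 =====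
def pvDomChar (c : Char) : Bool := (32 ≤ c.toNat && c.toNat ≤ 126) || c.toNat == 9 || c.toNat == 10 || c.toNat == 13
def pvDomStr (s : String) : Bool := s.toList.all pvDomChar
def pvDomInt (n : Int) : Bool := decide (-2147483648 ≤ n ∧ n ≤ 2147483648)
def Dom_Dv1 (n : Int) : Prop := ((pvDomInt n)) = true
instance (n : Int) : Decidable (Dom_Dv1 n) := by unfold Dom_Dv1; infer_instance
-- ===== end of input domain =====

-- B replaces A's big-integer pipeline (build the product of all binomials, then trial-divide
-- that huge number) by computing each prime's exponent in that product directly as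
-- sum_{j=2..n} v_p(j)*(2j-n-1), using only small-int arithmetic (an alternative
-- algorithm; no speed is claimed).

-- ===== PORT A =====
def pvFact (n : Int) : Int :=
  if n = 1 ∨ n = 0 then 1
  else if n < 0 then 1  -- termination guard: Python recurses forever here; never reached from Dv1
  else n * pvFact (n - 1)
termination_by n.toNat
decreasing_by omega

def pvCv1 (n k : Int) : Int :=
  PySem.Int.floordiv (PySem.Int.floordiv (pvFact n) (pvFact k)) (pvFact (n - k))

def pvBv1 (n : Int) : Int :=
  (PySem.List.pyRange 0 (n + 1) 1).foldl (fun r i => r * pvCv1 n i) 1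

-- the `while B % i == 0: B //= i; c += 1` loop; guards `2 ≤ i ∧ 0 < b` only ensure
-- termination (Python would loop forever on b = 0; never reached from Dv1)
def pvDivOut (b i c : Int) : Int × Int :=
  if h : 2 ≤ i ∧ 0 < b ∧ PySem.Int.mod b i = 0 then
    pvDivOut (PySem.Int.floordiv b i) i (c + 1)
  else (b, c)
termination_by b.toNat
decreasing_by
  have h1 : PySem.Int.floordiv b i = b / i := PySem.Int.floordiv_eq_ediv_of_pos (by omega)
  have h2 : b / i < b := by apply Int.ediv_lt_of_lt_mul (by omega); nlinarith [h.2.1]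
  omega

def Dv1 (n : Int) : Int :=
  let B := pvBv1 n
  let s := (PySem.List.pyRange 2 (n + 1) 1).foldl
    (fun (s : Int × List (Int × Int)) i =>
      if PySem.Int.mod s.1 i = 0 then
        let d := pvDivOut s.1 i 0
        (d.1, s.2 ++ [(i, d.2)])
      else s) (B, [])
  -- f[0] ** (f[1] + 1): the exponent f.2 + 1 is always ≥ 2 here, so `.toNat` is exact
  s.2.foldl (fun r f => r * PySem.Int.floordiv (f.1 ^ (f.2 + 1).toNat - 1) (f.1 - 1)) 1

-- ===== PORT B =====
-- `for d in range(2, p): if p % d == 0: return False / return True` (value-exact as `all`)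
def altIsPrime (p : Int) : Bool :=
  (PySem.List.pyRange 2 p 1).all (fun d => PySem.Int.mod p d != 0)

-- `c = 0; while m % p == 0: m //= p; c += 1; return c`; guards `2 ≤ p ∧ 0 < m` only for
-- termination (never reached from Dv1_alt, which calls it with m ≥ 2, p ≥ 2)
def altVp (m p c : Int) : Int :=
  if h : 2 ≤ p ∧ 0 < m ∧ PySem.Int.mod m p = 0 then
    altVp (PySem.Int.floordiv m p) p (c + 1)
  else c
termination_by m.toNat
decreasing_by
  have h1 : PySem.Int.floordiv m p = m / p := PySem.Int.floordiv_eq_ediv_of_pos (by omega)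
  have h2 : m / p < m := by apply Int.ediv_lt_of_lt_mul (by omega); nlinarith [h.2.1]
  omega

def Dv1_alt (n : Int) : Int :=
  (PySem.List.pyRange 2 (n + 1) 1).foldl (fun r p =>
    if altIsPrime p then
      let e := (PySem.List.pyRange 2 (n + 1) 1).foldl
        (fun e j => e + altVp j p 0 * (2 * j - n - 1)) 0
      -- p ** (e + 1): the exponent e + 1 is ≥ 2 whenever used, so `.toNat` is exact
      if 0 < e then r * PySem.Int.floordiv (p ^ (e + 1).toNat - 1) (p - 1) else r
    else r) 1

-- ===== PRECONDITION & SPEC =====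
-- Pre_ excludes n > 980: there A's recursive `fact` overflows CPython's default recursion
-- limit (~1000 frames) and raises RecursionError; the bound keeps a small margin of caller
-- frames below the exact limit, so it also excludes a few inputs (n in (980, ~995)) on
-- which A still returns — B returns the same value there.
def Pre_Dv1 (n : Int) : Prop := n ≤ 980
instance (n : Int) : Decidable (Pre_Dv1 n) := by unfold Pre_Dv1; infer_instance
def pvWitness_Dv1 : Int := (10)

def Spec_Dv1 (n : Int) (out : Int) : Prop := out = Dv1_alt n
instance (n : Int) (out : Int) : Decidable (Spec_Dv1 n out) := by unfold Spec_Dv1; infer_instance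

-- ===== CLAIM (what is proved, stated in full; the proofs are below) =====
def Claim_equal_Dv1 : Prop := ∀ (n : Int), Dom_Dv1 n → Pre_Dv1 n → Spec_Dv1 n (Dv1 n)

-- ===== LEMMAS AND PROOFS =====

-- The product A names `B`: prod_{i=0..n} C(n,i), as a Nat
def NB (m : Nat) : Nat := ∏ i ∈ Finset.range (m + 1), m.choose i

-- the two loop bodies and the shared sigma-term, named so folds can be reasoned about
def stepA : (Int × List (Int × Int)) → Int → (Int × List (Int × Int)) := fun s i =>
  if PySem.Int.mod s.1 i = 0 then
    let d := pvDivOut s.1 i 0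
    (d.1, s.2 ++ [(i, d.2)])
  else s

def sigFold : Int → (Int × Int) → Int := fun r f =>
  r * PySem.Int.floordiv (f.1 ^ (f.2 + 1).toNat - 1) (f.1 - 1)

def stepB (n : Int) : Int → Int → Int := fun r p =>
  if altIsPrime p then
    let e := (PySem.List.pyRange 2 (n + 1) 1).foldl
      (fun e j => e + altVp j p 0 * (2 * j - n - 1)) 0
    if 0 < e then r * PySem.Int.floordiv (p ^ (e + 1).toNat - 1) (p - 1) else r
  else r

-- the factor list both programs effectively produce
def facEntry (N q : Nat) : Option (Int × Int) :=
  if q.Prime ∧ 0 < N.factorization q then some ((q : Int), (N.factorization q : Int)) else none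

def facList (N a k : Nat) : List (Int × Int) :=
  (List.range k).filterMap (fun j => facEntry N (a + j))

lemma Dv1_eq (n : Int) :
    Dv1 n = ((PySem.List.pyRange 2 (n + 1) 1).foldl stepA (pvBv1 n, [])).2.foldl sigFold 1 := rfl

lemma Dv1_alt_eq (n : Int) :
    Dv1_alt n = (PySem.List.pyRange 2 (n + 1) 1).foldl (stepB n) 1 := rfl

lemma facList_succ (N a k : Nat) :
    facList N a (k + 1) = (facEntry N a).toList ++ facList N (a + 1) k := by
  simp only [facList, List.range_succ_eq_map, List.filterMap_cons, List.filterMap_map]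
  have h1 : ((fun j => facEntry N (a + j)) ∘ Nat.succ) = fun j => facEntry N (a + 1 + j) := by
    funext j; simp only [Function.comp]; congr 1; omega
  rw [h1, Nat.add_zero]
  cases facEntry N a <;> simp

lemma pvFact_nat (k : Nat) : pvFact (k : Int) = (k.factorial : Int) := by
  induction k with
  | zero => rw [pvFact]; norm_num
  | succ k ih =>
    rw [pvFact]
    by_cases hk : k = 0
    · subst hk; norm_num
    · have h1 : ¬(((k : Int) + 1 = 1) ∨ ((k : Int) + 1 = 0)) := by omega
      have h2 : ¬((k : Int) + 1 < 0) := by omega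
      push_cast
      rw [if_neg h1, if_neg h2]
      have h3 : (k : Int) + 1 - 1 = (k : Int) := by ring
      rw [h3, ih, Nat.factorial_succ]
      push_cast; ring

lemma pvCv1_nat (m i : Nat) (h : i ≤ m) : pvCv1 (m : Int) (i : Int) = (m.choose i : Int) := by
  unfold pvCv1
  rw [show ((m : Int) - (i : Int)) = ((m - i : Nat) : Int) by push_cast [h]; ring]
  rw [pvFact_nat, pvFact_nat, pvFact_nat, PySem.Int.floordiv_natCast, PySem.Int.floordiv_natCast]
  norm_cast
  rw [Nat.div_div_eq_div_mul, ← Nat.choose_eq_factorial_div_factorial h]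

lemma foldA_mul (m : Nat) : ∀ (l : List Nat) (r0 : Nat), (∀ i ∈ l, i ≤ m) →
    (l.map (fun i : Nat => (i : Int))).foldl (fun r i => r * pvCv1 (m : Int) i) (r0 : Int)
      = ((r0 * (l.map (m.choose ·)).prod : Nat) : Int) := by
  intro l
  induction l with
  | nil => intro r0 _; simp
  | cons x xs ih =>
    intro r0 hle
    rw [List.map_cons, List.foldl_cons, pvCv1_nat m x (hle x (by simp))]
    rw [show ((r0 : Int) * ((m.choose x : Nat) : Int)) = ((r0 * m.choose x : Nat) : Int) by push_cast; ring]
    rw [ih (r0 * m.choose x) (fun i hi => hle i (by simp [hi]))]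
    push_cast [List.map_cons, List.prod_cons]; ring

lemma pvBv1_nat (m : Nat) : pvBv1 (m : Int) = (NB m : Int) := by
  unfold pvBv1
  rw [show ((m : Int) + 1) = ((m + 1 : Nat) : Int) by omega]
  rw [PySem.List.pyRange_zero_nat]
  rw [show (1 : Int) = ((1 : Nat) : Int) by norm_num]
  rw [foldA_mul m (List.range (m + 1)) 1 (fun i hi => by simp at hi; omega)]
  have : NB m = ((List.range (m + 1)).map (m.choose ·)).prod := rfl
  rw [this]; push_cast; ring

lemma NB_pos (m : Nat) : 0 < NB m := by
  apply Finset.prod_pos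
  intro i hi
  exact Nat.choose_pos (by simp at hi; omega)

lemma pvDivOut_prime (p : Nat) (hp : p.Prime) : ∀ (b : Nat), 0 < b → ∀ (c : Int),
    pvDivOut (b : Int) (p : Int) c
      = (((b / p ^ b.factorization p : Nat) : Int), c + (b.factorization p : Int)) := by
  intro b
  induction b using Nat.strong_induction_on with
  | _ b ih =>
  intro hb c
  rw [pvDivOut]
  by_cases hdvd : p ∣ b
  · have hcond : 2 ≤ (p : Int) ∧ 0 < (b : Int) ∧ PySem.Int.mod (b : Int) (p : Int) = 0 :=
      ⟨by exact_mod_cast hp.two_le, by exact_mod_cast hb,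
       (PySem.Int.mod_eq_zero_iff_dvd _ _).mpr (Int.natCast_dvd_natCast.mpr hdvd)⟩
    rw [dif_pos hcond, PySem.Int.floordiv_natCast]
    have hblt : b / p < b := Nat.div_lt_self hb hp.one_lt
    have hbp : 0 < b / p := Nat.div_pos (Nat.le_of_dvd hb hdvd) hp.pos
    rw [ih (b / p) hblt hbp (c + 1)]
    have hv1 : 1 ≤ b.factorization p := (hp.dvd_iff_one_le_factorization (by omega)).mp hdvd
    have hfd : (b / p).factorization p = b.factorization p - 1 := by
      rw [Nat.factorization_div hdvd, Finsupp.tsub_apply, hp.factorization]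
      simp
    rw [hfd]
    simp only [Prod.mk.injEq]
    constructor
    · norm_cast
      rw [Nat.div_div_eq_div_mul]
      congr 1
      rw [← pow_succ', Nat.sub_add_cancel hv1]
    · omega
  · rw [dif_neg]
    · have hv0 : b.factorization p = 0 := Nat.factorization_eq_zero_of_not_dvd hdvd
      rw [hv0]; simp
    · rintro ⟨_, _, h3⟩
      rw [PySem.Int.mod_eq_zero_iff_dvd] at h3
      exact hdvd (Int.natCast_dvd_natCast.mp h3)

lemma altVp_prime (p : Nat) (hp : p.Prime) : ∀ (b : Nat), 0 < b → ∀ (c : Int),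
    altVp (b : Int) (p : Int) c = c + (b.factorization p : Int) := by
  intro b
  induction b using Nat.strong_induction_on with
  | _ b ih =>
  intro hb c
  rw [altVp]
  by_cases hdvd : p ∣ b
  · have hcond : 2 ≤ (p : Int) ∧ 0 < (b : Int) ∧ PySem.Int.mod (b : Int) (p : Int) = 0 :=
      ⟨by exact_mod_cast hp.two_le, by exact_mod_cast hb,
       (PySem.Int.mod_eq_zero_iff_dvd _ _).mpr (Int.natCast_dvd_natCast.mpr hdvd)⟩
    rw [dif_pos hcond, PySem.Int.floordiv_natCast]
    have hblt : b / p < b := Nat.div_lt_self hb hp.one_lt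
    have hbp : 0 < b / p := Nat.div_pos (Nat.le_of_dvd hb hdvd) hp.pos
    rw [ih (b / p) hblt hbp (c + 1)]
    have hv1 : 1 ≤ b.factorization p := (hp.dvd_iff_one_le_factorization (by omega)).mp hdvd
    have hfd : (b / p).factorization p = b.factorization p - 1 := by
      rw [Nat.factorization_div hdvd, Finsupp.tsub_apply, hp.factorization]
      simp
    rw [hfd, Nat.cast_sub hv1]
    ring
  · rw [dif_neg]
    · have hv0 : b.factorization p = 0 := Nat.factorization_eq_zero_of_not_dvd hdvd
      rw [hv0]; simp
    · rintro ⟨_, _, h3⟩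
      rw [PySem.Int.mod_eq_zero_iff_dvd] at h3
      exact hdvd (Int.natCast_dvd_natCast.mp h3)

lemma altIsPrime_iff (q : Nat) (hq : 2 ≤ q) : altIsPrime (q : Int) = true ↔ q.Prime := by
  unfold altIsPrime
  rw [List.all_eq_true]
  constructor
  · intro h
    rw [Nat.prime_def_lt]
    refine ⟨hq, fun e he hdvd => ?_⟩
    by_contra h1
    have he2 : 2 ≤ e := by
      rcases Nat.lt_or_ge e 2 with h2 | h2
      · interval_cases e
        · exact absurd (Nat.eq_zero_of_zero_dvd hdvd) (by omega)
        · exact absurd rfl h1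
      · exact h2
    have hmem : (e : Int) ∈ PySem.List.pyRange 2 (q : Int) 1 := by
      rw [PySem.List.mem_pyRange_one]; constructor <;> [exact_mod_cast he2; exact_mod_cast he]
    have := h _ hmem
    simp only [bne_iff_ne, ne_eq] at this
    exact this ((PySem.Int.mod_eq_zero_iff_dvd _ _).mpr (Int.natCast_dvd_natCast.mpr hdvd))
  · intro hp d hd
    rw [PySem.List.mem_pyRange_one] at hd
    simp only [bne_iff_ne, ne_eq]
    intro hmod
    rw [PySem.Int.mod_eq_zero_iff_dvd] at hmod
    have hd0 : 0 ≤ d := by omega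
    obtain ⟨e, rfl⟩ := Int.eq_ofNat_of_zero_le hd0
    have hdvd : e ∣ q := Int.natCast_dvd_natCast.mp hmod
    have := (Nat.prime_def_lt.mp hp).2 e (by exact_mod_cast hd.2) hdvd
    omega

lemma A_fold (N m : Nat) : ∀ (k a b : Nat) (fc : List (Int × Int)),
    2 ≤ a → a + k = m + 1 → 0 < b →
    (∀ p : Nat, p.Prime → p ∣ b → a ≤ p) →
    (∀ p : Nat, p.Prime → a ≤ p → b.factorization p = N.factorization p) →
    ((PySem.List.pyRange (a : Int) ((m : Int) + 1) 1).foldl stepA ((b : Int), fc)).2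
      = fc ++ facList N a k := by
  intro k
  induction k with
  | zero =>
    intro a b fc h2 hk hb _ _
    rw [PySem.List.pyRange_one_eq_nil (by omega)]
    simp [facList]
  | succ k ih =>
    intro a b fc h2 hk hb hmin hfac
    have hab : (a : Int) < (m : Int) + 1 := by omega
    rw [PySem.List.pyRange_one_cons hab, List.foldl_cons]
    by_cases hdvd : a ∣ b
    · have hprime : a.Prime := by
        by_contra hcomp
        have hmf : a.minFac.Prime := Nat.minFac_prime (by omega)
        have hmfb : a.minFac ∣ b := (Nat.minFac_dvd a).trans hdvd
        have hge := hmin _ hmf hmfb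
        have hle : a.minFac ≤ a := Nat.minFac_le (by omega)
        have heq : a.minFac = a := le_antisymm hle hge
        exact hcomp (heq ▸ hmf)
      have hmod : PySem.Int.mod ((b : Int)) ((a : Int)) = 0 :=
        (PySem.Int.mod_eq_zero_iff_dvd _ _).mpr (Int.natCast_dvd_natCast.mpr hdvd)
      set v := b.factorization a with hv
      have hvN : v = N.factorization a := hfac a hprime le_rfl
      have hv1 : 1 ≤ v := (hprime.dvd_iff_one_le_factorization (by omega)).mp hdvd
      have hstep : stepA ((b : Int), fc) (a : Int)
          = (((b / a ^ v : Nat) : Int), fc ++ [((a : Int), (v : Int))]) := by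
        simp only [stepA]
        rw [if_pos hmod, pvDivOut_prime a hprime b hb 0]
        simp [← hv]
      rw [hstep]
      have hpowdvd : a ^ v ∣ b := (hprime.pow_dvd_iff_le_factorization (by omega)).mpr le_rfl
      have hb' : 0 < b / a ^ v := Nat.div_pos (Nat.le_of_dvd hb hpowdvd) (pow_pos hprime.pos v)
      have hbdvd : b / a ^ v ∣ b := ⟨a ^ v, (Nat.div_mul_cancel hpowdvd).symm⟩
      have hfac' : ∀ q : Nat,
          (b / a ^ v).factorization q = b.factorization q - (if q = a then v else 0) := by
        intro q
        rw [Nat.factorization_div hpowdvd, Finsupp.tsub_apply, hprime.factorization_pow]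
        by_cases hqa : q = a
        · subst hqa; simp
        · rw [Finsupp.single_eq_of_ne hqa, if_neg hqa]
      have hnota : ¬ a ∣ (b / a ^ v) := by
        intro hcon
        have h1 := (hprime.dvd_iff_one_le_factorization (by omega)).mp hcon
        rw [hfac' a] at h1
        simp at h1
        omega
      have ih' := ih (a + 1) (b / a ^ v) (fc ++ [((a : Int), (v : Int))]) (by omega) (by omega) hb'
        (by
          intro q hq hqdvd
          have hge := hmin q hq (hqdvd.trans hbdvd)
          have hqa : q ≠ a := by rintro rfl; exact hnota hqdvd
          omega)
        (by
          intro q hq hq1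
          rw [hfac' q, if_neg (by omega : ¬ q = a), Nat.sub_zero]
          exact hfac q hq (by omega))
      rw [show ((a : Int) + 1) = (((a + 1 : Nat)) : Int) by omega, ih']
      have hEntry : facEntry N a = some ((a : Int), (v : Int)) := by
        unfold facEntry
        rw [if_pos ⟨hprime, by omega⟩, ← hvN]
      rw [facList_succ, hEntry]
      simp
    · have hmod : ¬ PySem.Int.mod ((b : Int)) ((a : Int)) = 0 := by
        rw [PySem.Int.mod_eq_zero_iff_dvd]
        exact fun hcon => hdvd (Int.natCast_dvd_natCast.mp hcon)
      have hstep : stepA ((b : Int), fc) (a : Int) = ((b : Int), fc) := by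
        simp only [stepA]; rw [if_neg hmod]
      rw [hstep, show ((a : Int) + 1) = (((a + 1 : Nat)) : Int) by omega]
      rw [ih (a + 1) b fc (by omega) (by omega) hb
        (by
          intro q hq hqd
          have := hmin q hq hqd
          have hqa : q ≠ a := fun h => hdvd (h ▸ hqd)
          omega)
        (by intro q hq hq1; exact hfac q hq (by omega))]
      have hEntry : facEntry N a = none := by
        unfold facEntry
        rw [if_neg]
        rintro ⟨hpr, hpos⟩
        have h1 : b.factorization a = N.factorization a := hfac a hpr le_rfl
        have h0 : b.factorization a = 0 := Nat.factorization_eq_zero_of_not_dvd hdvd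
        omega
      rw [facList_succ, hEntry]
      simp

-- Legendre-style fact: the factorization of i! is the sum of those of 1..i
lemma fact_factorization (q i : Nat) :
    ((i.factorial.factorization q : Nat) : Int)
      = ∑ j ∈ Finset.Ico 1 (i + 1), ((j.factorization q : Nat) : Int) := by
  induction i with
  | zero => simp [Nat.factorial]
  | succ i ih =>
    rw [Nat.factorial_succ,
      Nat.factorization_mul (Nat.succ_ne_zero i) (Nat.factorial_ne_zero i)]
    rw [Finset.sum_Ico_succ_top (by omega)]
    simp only [Finsupp.add_apply]
    push_cast
    rw [ih]
    ring

lemma choose_factorization (q m i : Nat) (h : i ≤ m) :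
    ((m.choose i).factorization q : Int)
      = (m.factorial.factorization q : Int) - (i.factorial.factorization q : Int)
        - ((m - i).factorial.factorization q : Int) := by
  have hchoose := Nat.choose_mul_factorial_mul_factorial h
  have h1 : (m.choose i * i.factorial * (m - i).factorial).factorization q
      = m.factorial.factorization q := by rw [hchoose]
  rw [Nat.factorization_mul (Nat.mul_ne_zero (Nat.choose_pos h).ne' (Nat.factorial_ne_zero _))
      (Nat.factorial_ne_zero _),
    Nat.factorization_mul (Nat.choose_pos h).ne' (Nat.factorial_ne_zero _)] at h1
  simp only [Finsupp.add_apply] at h1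
  omega

lemma double_sum (f : Nat → Int) : ∀ m : Nat,
    ∑ i ∈ Finset.range (m + 1), ∑ j ∈ Finset.Ico 1 (i + 1), f j
      = ∑ j ∈ Finset.Ico 1 (m + 1), ((m : Int) + 1 - (j : Int)) * f j := by
  intro m
  induction m with
  | zero => simp
  | succ m ih =>
    rw [Finset.sum_range_succ, ih]
    have hsplit : ∑ j ∈ Finset.Ico 1 (m + 1 + 1), ((m : Int) + 1 + 1 - (j : Int)) * f j
        = (∑ j ∈ Finset.Ico 1 (m + 1), ((m : Int) + 1 - (j : Int)) * f j)
          + ∑ j ∈ Finset.Ico 1 (m + 1 + 1), f j := by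
      rw [show (∑ j ∈ Finset.Ico 1 (m + 1 + 1), ((m : Int) + 1 + 1 - (j : Int)) * f j)
            = ∑ j ∈ Finset.Ico 1 (m + 1 + 1), (((m : Int) + 1 - (j : Int)) * f j + f j) from
          Finset.sum_congr rfl (fun j _ => by ring)]
      rw [Finset.sum_add_distrib, Finset.sum_Ico_succ_top (by omega : 1 ≤ m + 1)]
      push_cast
      ring
    push_cast
    rw [hsplit]

lemma NB_factorization (m q : Nat) :
    (((NB m).factorization q : Nat) : Int)
      = ∑ j ∈ Finset.Ico 2 (m + 1),
          ((j.factorization q : Nat) : Int) * (2 * (j : Int) - (m : Int) - 1) := by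
  rcases Nat.eq_zero_or_pos m with hm | hm
  · subst hm; simp [NB]
  · have hNBf : (((NB m).factorization q : Nat) : Int)
        = ∑ i ∈ Finset.range (m + 1), (((m.choose i).factorization q : Nat) : Int) := by
      unfold NB
      rw [Nat.factorization_prod (fun i hi => (Nat.choose_pos (by simp at hi; omega)).ne')]
      rw [Finsupp.finset_sum_apply]
      push_cast
      rfl
    rw [hNBf]
    rw [Finset.sum_congr rfl
      (fun i hi => choose_factorization q m i (by simp at hi; omega))]
    rw [Finset.sum_sub_distrib, Finset.sum_sub_distrib, Finset.sum_const, Finset.card_range]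
    have hreflect : ∑ i ∈ Finset.range (m + 1), (((m - i).factorial.factorization q : Nat) : Int)
        = ∑ i ∈ Finset.range (m + 1), ((i.factorial.factorization q : Nat) : Int) := by
      rw [← Finset.sum_range_reflect (fun i => ((i.factorial.factorization q : Nat) : Int)) (m + 1)]
      exact Finset.sum_congr rfl (fun j _ => by norm_num)
    rw [hreflect]
    rw [Finset.sum_congr rfl (fun i (_ : i ∈ Finset.range (m + 1)) => fact_factorization q i)]
    rw [double_sum, fact_factorization q m]
    have hcombine : (m + 1) • (∑ j ∈ Finset.Ico 1 (m + 1), ((j.factorization q : Nat) : Int))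
          - (∑ j ∈ Finset.Ico 1 (m + 1), ((m : Int) + 1 - (j : Int)) * ((j.factorization q : Nat) : Int))
          - (∑ j ∈ Finset.Ico 1 (m + 1), ((m : Int) + 1 - (j : Int)) * ((j.factorization q : Nat) : Int))
        = ∑ j ∈ Finset.Ico 1 (m + 1),
            ((j.factorization q : Nat) : Int) * (2 * (j : Int) - (m : Int) - 1) := by
      rw [nsmul_eq_mul, Finset.mul_sum, ← Finset.sum_sub_distrib, ← Finset.sum_sub_distrib]
      exact Finset.sum_congr rfl (fun j _ => by push_cast; ring)
    rw [hcombine]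
    rw [Finset.sum_eq_sum_Ico_succ_bot (by omega : 1 < m + 1)]
    simp

lemma e_sum (m q : Nat) (hq : q.Prime) :
    (PySem.List.pyRange 2 ((m : Int) + 1) 1).foldl
        (fun e j => e + altVp j (q : Int) 0 * (2 * j - (m : Int) - 1)) 0
      = (((NB m).factorization q : Nat) : Int) := by
  rw [PySem.List.foldl_add, zero_add, PySem.List.pyRange_one, List.map_map]
  have hlen : ((m : Int) + 1 - 2).toNat = m - 1 := by omega
  rw [hlen]
  have hpt : ∀ k ∈ List.range (m - 1),
      ((fun j => altVp j (q : Int) 0 * (2 * j - (m : Int) - 1)) ∘ fun k : Nat => 2 + (k : Int)) k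
        = (((k + 2).factorization q : Nat) : Int) * (2 * ((k + 2 : Nat) : Int) - (m : Int) - 1) := by
    intro k _
    simp only [Function.comp]
    rw [show (2 + (k : Int)) = ((k + 2 : Nat) : Int) by omega]
    rw [altVp_prime q hq (k + 2) (by omega) 0, zero_add]
  rw [List.map_congr_left hpt]
  have hsum : (List.map (fun k : Nat =>
        (((k + 2).factorization q : Nat) : Int) * (2 * ((k + 2 : Nat) : Int) - (m : Int) - 1))
        (List.range (m - 1))).sum
      = ∑ k ∈ Finset.range (m - 1),
          (((k + 2).factorization q : Nat) : Int) * (2 * ((k + 2 : Nat) : Int) - (m : Int) - 1) := rfl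
  rw [hsum, NB_factorization m q, Finset.sum_Ico_eq_sum_range]
  rw [show m + 1 - 2 = m - 1 from by omega]
  exact Finset.sum_congr rfl (fun k _ => by push_cast; ring_nf)

lemma B_fold (m : Nat) : ∀ (k a : Nat) (r0 : Int),
    2 ≤ a → a + k = m + 1 →
    (PySem.List.pyRange (a : Int) ((m : Int) + 1) 1).foldl (stepB (m : Int)) r0
      = (facList (NB m) a k).foldl sigFold r0 := by
  intro k
  induction k with
  | zero =>
    intro a r0 h2 hk
    rw [PySem.List.pyRange_one_eq_nil (by omega)]
    simp [facList]
  | succ k ih =>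
    intro a r0 h2 hk
    rw [PySem.List.pyRange_one_cons (by omega : (a : Int) < (m : Int) + 1), List.foldl_cons]
    rw [facList_succ]
    by_cases hp : a.Prime
    · have hprime_t : altIsPrime (a : Int) = true := (altIsPrime_iff a h2).mpr hp
      have hstep : stepB (m : Int) r0 (a : Int)
          = if 0 < (((NB m).factorization a : Nat) : Int) then
              r0 * PySem.Int.floordiv
                ((a : Int) ^ ((((NB m).factorization a : Nat) : Int) + 1).toNat - 1) ((a : Int) - 1)
            else r0 := by
        simp only [stepB, hprime_t, if_true]
        rw [e_sum m a hp]
      rw [hstep]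
      by_cases hpos : 0 < (NB m).factorization a
      · rw [if_pos (by exact_mod_cast hpos)]
        have hE : facEntry (NB m) a = some ((a : Int), ((NB m).factorization a : Int)) := by
          unfold facEntry; rw [if_pos ⟨hp, hpos⟩]
        rw [hE, show ((a : Int) + 1) = (((a + 1 : Nat)) : Int) by omega,
          ih (a + 1) _ (by omega) (by omega)]
        simp [sigFold]
      · rw [if_neg (by simpa using hpos)]
        have hE : facEntry (NB m) a = none := by
          unfold facEntry; rw [if_neg (fun h => hpos h.2)]
        rw [hE, show ((a : Int) + 1) = (((a + 1 : Nat)) : Int) by omega,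
          ih (a + 1) _ (by omega) (by omega)]
        simp
    · have hprime_f : altIsPrime (a : Int) = false := by
        rcases hb : altIsPrime (a : Int) with _ | _
        · rfl
        · exact absurd ((altIsPrime_iff a h2).mp hb) hp
      have hstep : stepB (m : Int) r0 (a : Int) = r0 := by
        simp only [stepB, hprime_f]
        simp
      have hE : facEntry (NB m) a = none := by
        unfold facEntry; rw [if_neg (fun h => hp h.1)]
      rw [hstep, hE, show ((a : Int) + 1) = (((a + 1 : Nat)) : Int) by omega,
        ih (a + 1) _ (by omega) (by omega)]
      simp

-- ===== VERDICT (by name: the statement is the Claim_ definition above) =====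
theorem Dv1_spec : Claim_equal_Dv1 := by
  unfold Claim_equal_Dv1
  intro n _ _
  unfold Spec_Dv1
  rw [Dv1_eq, Dv1_alt_eq]
  by_cases hn : n < 2
  · rw [PySem.List.pyRange_one_eq_nil (by omega)]
    simp
  · rw [not_lt] at hn
    obtain ⟨m, rfl⟩ : ∃ m : Nat, n = (m : Int) := ⟨n.toNat, by omega⟩
    have hm2 : 2 ≤ m := by exact_mod_cast hn
    rw [pvBv1_nat]
    rw [show (2 : Int) = ((2 : Nat) : Int) from by norm_num]
    rw [A_fold (NB m) m (m - 1) 2 (NB m) [] (by omega) (by omega) (NB_pos m)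
        (fun p hp _ => hp.two_le) (fun _ _ _ => rfl)]
    rw [B_fold m (m - 1) 2 1 (by omega) (by omega)]
    simp
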